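-- pv_equiv track=rewrite | github.com/hewansirak/Codeforce_Practice | A_Zoro_s_Bounty_Dilemma.py | bounty_dilema
-- ===== SOURCE A (Python) =====
-- def bounty_dilema(s):
--     rel = '='
--     for c in s:
--         if c == '<' and rel == '>': return '?'
--         if c == '>' and rel == '<': return '?'
--         if c == '<': rel = '<'
--         if c == '>': rel = '>'
--     return rel
-- ===== SOURCE B (Python) =====
-- def bounty_dilema(s):
--     has_lt = '<' in s
--     has_gt = '>' in s
--     if has_lt and has_gt:
--         return '?'
--     if has_lt:
--         return '<'
--     if has_gt:
--         return '>'
--     return '='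
-- ===== Notes on version B (the rewrite author's own statement) =====
-- stated objective: simpler
-- what changed: Replaced A's stateful single-pass scan with early exit by two membership tests ('<' in s, '>' in s) done by the C-level substring search, followed by a flat four-way conditional.
import Mathlib
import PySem

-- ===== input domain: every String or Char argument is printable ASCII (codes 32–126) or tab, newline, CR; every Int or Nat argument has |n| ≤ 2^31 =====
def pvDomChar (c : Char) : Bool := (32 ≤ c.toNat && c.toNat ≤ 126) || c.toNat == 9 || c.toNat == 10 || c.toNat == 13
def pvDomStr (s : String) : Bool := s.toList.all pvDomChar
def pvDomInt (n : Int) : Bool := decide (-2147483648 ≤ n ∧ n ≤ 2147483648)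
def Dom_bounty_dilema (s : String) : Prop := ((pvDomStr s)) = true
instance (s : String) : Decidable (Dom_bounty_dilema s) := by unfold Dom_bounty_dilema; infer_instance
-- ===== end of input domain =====

-- B replaces A's stateful scan-with-early-exit by two membership tests and a flat conditional (simpler).

-- ===== PORT A =====
-- literal transliteration of A's loop: rel state, early return '?' on a direction flip
def bountyLoopA : List Char → String → String
  | [], rel => rel
  | c :: cs, rel =>
    if c = '<' ∧ rel = ">" then "?"
    else if c = '>' ∧ rel = "<" then "?"
    else bountyLoopA cs (if c = '<' then "<" else if c = '>' then ">" else rel)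

def bounty_dilema (s : String) : String := bountyLoopA s.toList "="

-- ===== PORT B =====
def bounty_dilema_alt (s : String) : String :=
  let has_lt := s.toList.contains '<'
  let has_gt := s.toList.contains '>'
  if has_lt && has_gt then "?"
  else if has_lt then "<"
  else if has_gt then ">"
  else "="

-- ===== PRECONDITION & SPEC =====
def Spec_bounty_dilema (s : String) (out : String) : Prop := out = bounty_dilema_alt s
instance (s : String) (out : String) : Decidable (Spec_bounty_dilema s out) := by unfold Spec_bounty_dilema; infer_instance

-- ===== CLAIM (what is proved, stated in full; the proofs are below) =====
def Claim_equal_bounty_dilema : Prop := ∀ (s : String), Dom_bounty_dilema s → Spec_bounty_dilema s (bounty_dilema s)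

-- ===== LEMMAS AND PROOFS =====

theorem bountyLoopA_lt (l : List Char) :
    bountyLoopA l "<" = if l.contains '>' then "?" else "<" := by
  induction l with
  | nil => simp [bountyLoopA]
  | cons c cs ih =>
    simp only [bountyLoopA, List.contains_cons]
    by_cases h : c = '>'
    · simp [h]
    · simp [h, ih, show ¬('>' = c) from fun hh => h hh.symm]

theorem bountyLoopA_gt (l : List Char) :
    bountyLoopA l ">" = if l.contains '<' then "?" else ">" := by
  induction l with
  | nil => simp [bountyLoopA]
  | cons c cs ih =>
    simp only [bountyLoopA, List.contains_cons]
    by_cases h : c = '<'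
    · simp [h]
    · simp [h, ih, show ¬('<' = c) from fun hh => h hh.symm]

theorem bountyLoopA_eq (l : List Char) :
    bountyLoopA l "=" =
      if l.contains '<' && l.contains '>' then "?"
      else if l.contains '<' then "<"
      else if l.contains '>' then ">"
      else "=" := by
  induction l with
  | nil => simp [bountyLoopA]
  | cons c cs ih =>
    simp only [bountyLoopA, List.contains_cons]
    by_cases h : c = '<'
    · simp [h, bountyLoopA_lt]
    · by_cases h2 : c = '>'
      · by_cases hl : '<' ∈ cs <;> simp [h2, hl, bountyLoopA_gt]
      · simp [h, h2, ih, show ¬('<' = c) from fun hh => h hh.symm, show ¬('>' = c) from fun hh => h2 hh.symm]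

-- ===== VERDICT (by name: the statement is the Claim_ definition above) =====
theorem bounty_dilema_spec : Claim_equal_bounty_dilema := by
  intro s _
  unfold Spec_bounty_dilema bounty_dilema bounty_dilema_alt
  simp only [bountyLoopA_eq]
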